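-- pv_equiv track=rewrite | github.com/reivak720/cows | racer.py | renata_kb
-- ===== SOURCE A (Python) =====
-- def largestcow(cows):
--     """
--     Parameters:
--     cows - a dictionary of name (string), weight (int) pairs
--
--     Returns:
--     Pop the largest cow and returns its name
--     """
--     largest=max(cows.values())
--     for name, weight in cows.items():
--         if weight==largest:
--             onboard=name
--             return cows.pop(name), onboard
--
-- def renata_kb(cows,limit=10):
--     crew=cows.copy()
--     travel=[]
--     while crew:
--         trip=[]
--         tripwgt, firstcow = largestcow(crew)
--         trip.append(firstcow)
--         left=crew.copy()
--         while left:
--             newwgt, newcow = largestcow(left)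
--             if tripwgt+newwgt<=limit:
--                tripwgt+=crew.pop(newcow)
--                trip.append(newcow)
--             if tripwgt==limit:
--                 break
--         travel.append(trip)
--     return travel
-- ===== SOURCE B (Python) =====
-- def renata_kb(cows, limit=10):
--     # Sort once, heaviest first (stable: ties keep dict insertion order),
--     # then greedily pack each trip by a single scan over the remaining sorted list.
--     order = sorted(cows.items(), key=lambda p: -p[1])
--     travel = []
--     while order:
--         (first, fw), rest = order[0], order[1:]
--         trip = [first]
--         tripwgt = fw
--         leftover = []
--         for i, (name, w) in enumerate(rest):
--             if tripwgt + w <= limit: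
--                 tripwgt += w
--                 trip.append(name)
--             else:
--                 leftover.append((name, w))
--             if tripwgt == limit:
--                 leftover.extend(rest[i + 1:])
--                 break
--         travel.append(trip)
--         order = leftover
--     return travel
-- ===== Notes on version B (the rewrite author's own statement) =====
-- stated objective: faster
-- what changed: A repeatedly rescans the whole remaining dict (max over values + linear search + dict copies) for every cow of every trip; B sorts the cows once by descending weight (stable, so ties keep insertion order) and builds each trip by a single greedy scan over the remaining sorted list, carrying the non-packed cows to the next trip.
import Mathlib
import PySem

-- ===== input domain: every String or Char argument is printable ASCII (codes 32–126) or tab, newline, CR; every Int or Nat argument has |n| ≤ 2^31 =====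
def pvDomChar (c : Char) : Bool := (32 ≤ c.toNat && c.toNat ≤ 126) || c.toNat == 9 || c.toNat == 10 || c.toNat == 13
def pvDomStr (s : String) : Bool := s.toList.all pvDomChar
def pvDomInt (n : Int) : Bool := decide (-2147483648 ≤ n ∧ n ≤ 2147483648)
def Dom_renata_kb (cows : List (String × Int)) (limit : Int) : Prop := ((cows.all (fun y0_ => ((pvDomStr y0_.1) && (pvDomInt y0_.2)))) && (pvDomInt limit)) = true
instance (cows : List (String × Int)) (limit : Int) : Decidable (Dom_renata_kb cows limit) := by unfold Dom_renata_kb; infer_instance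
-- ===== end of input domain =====

-- B sorts the cows once by descending weight (stable) and packs each trip with one greedy scan
-- over the remaining sorted list, instead of A's repeated max-rescans over dict copies: faster.


-- ===== PORT A =====
-- largestcow(cows): largest = max(cows.values()); first (name, weight) with weight == largest;
-- returns (cows.pop(name), name) together with the mutated dict.  none = the Python raise/None paths.
def largestcowA (d : PySem.Dict String Int) : Option (Int × String × PySem.Dict String Int) :=
  match PySem.List.max? d.values (fun v => v) with
  | none => none          -- max() on empty values: ValueError (callers guard with `while crew:`)
  | some largest =>
    match d.items.find? (fun p => p.2 == largest) with
    | none => none        -- Python falls off the loop returning None (unreachable)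
    | some (name, _) =>
      match d.pop? name with
      | none => none      -- KeyError (unreachable: name comes from the dict)
      | some (w, d') => some (w, name, d')

-- inner `while left:` loop of renata_kb: pops cows from `left`, adds the fitting ones to the trip
-- (popping them from `crew` too), breaks when tripwgt == limit; returns (tripwgt, trip, crew).
-- fuel (= `left`'s size at the call) is a totality guard only: each iteration pops one cow from left.
def innerA (limit : Int) (fuel : Nat) (left crew : PySem.Dict String Int) (tripwgt : Int)
    (trip : List String) : Int × List String × PySem.Dict String Int :=
  match fuel with
  | 0 => (tripwgt, trip, crew)
  | fuel + 1 =>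
    match largestcowA left with
    | none => (tripwgt, trip, crew)
    | some (newwgt, newcow, left') =>
      if tripwgt + newwgt ≤ limit then
        match crew.pop? newcow with
        | none => (tripwgt, trip, crew)  -- KeyError (unreachable: left's keys are crew's keys)
        | some (w, crew') =>
          if tripwgt + w = limit then (tripwgt + w, trip ++ [newcow], crew')
          else innerA limit fuel left' crew' (tripwgt + w) (trip ++ [newcow])
      else
        if tripwgt = limit then (tripwgt, trip, crew)
        else innerA limit fuel left' crew tripwgt trip

-- outer `while crew:` loop: pop the largest cow to start a trip, fill it with the inner loop
-- (fuel = crew's size: each trip pops at least the first cow)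
def outerA (limit : Int) (fuel : Nat) (crew : PySem.Dict String Int) : List (List String) :=
  match fuel with
  | 0 => []
  | fuel + 1 =>
    match largestcowA crew with
    | none => []
    | some (tripwgt, firstcow, crew') =>
      match innerA limit crew'.items.length crew' crew' tripwgt [firstcow] with
      | (_, trip, crew'') => trip :: outerA limit fuel crew''

def renata_kb (cows : List (String × Int)) (limit : Int) : List (List String) :=
  outerA limit (PySem.Dict.ofList cows).items.length (PySem.Dict.ofList cows)

-- ===== PORT B =====
-- one greedy scan over the descending-sorted remainder: fitting cows join the trip,
-- the others go to `leftover`; break (dumping the unscanned suffix) once tripwgt == limit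
def packB (limit tripwgt : Int) (trip : List String) (rest : List (String × Int)) :
    List String × List (String × Int) :=
  match rest with
  | [] => (trip, [])
  | (n, w) :: rs =>
    if tripwgt + w ≤ limit then
      if tripwgt + w = limit then (trip ++ [n], rs)
      else packB limit (tripwgt + w) (trip ++ [n]) rs
    else if tripwgt = limit then (trip, (n, w) :: rs)
    else
      match packB limit tripwgt trip rs with
      | (t, lo) => (t, (n, w) :: lo)

-- `while order:` loop over the sorted list (fuel = the list's length: every trip removes its head)
def outerB (limit : Int) (fuel : Nat) (order : List (String × Int)) : List (List String) :=
  match fuel, order with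
  | 0, _ => []
  | _, [] => []
  | fuel + 1, (n, w) :: rest =>
    match packB limit w [n] rest with
    | (trip, leftover) => trip :: outerB limit fuel leftover

def renata_kb_alt (cows : List (String × Int)) (limit : Int) : List (List String) :=
  outerB limit (PySem.List.sorted (PySem.Dict.ofList cows).items (fun p => -p.2) false).length
    (PySem.List.sorted (PySem.Dict.ofList cows).items (fun p => -p.2) false)

-- ===== PRECONDITION & SPEC =====
def Spec_renata_kb (cows : List (String × Int)) (limit : Int) (out : List (List String)) : Prop := out = renata_kb_alt cows limit
instance (cows : List (String × Int)) (limit : Int) (out : List (List String)) : Decidable (Spec_renata_kb cows limit out) := by unfold Spec_renata_kb; infer_instance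

-- ===== CLAIM (what is proved, stated in full; the proofs are below) =====
def Claim_equal_renata_kb : Prop := ∀ (cows : List (String × Int)) (limit : Int), Dom_renata_kb cows limit → Spec_renata_kb cows limit (renata_kb cows limit)

-- ===== LEMMAS AND PROOFS =====

-- descending stable sort, as Source B's sorted(key=lambda p: -p[1]) produces it
def sdesc (l : List (String × Int)) : List (String × Int) :=
  PySem.List.sorted l (fun p => -p.2) false

-- the comparator sorted/insertBy use for that key
def bef (a b : String × Int) : Bool := decide ((b.2 : Int) < a.2)

-- what largestcowA computes, phrased on the items list
def A_select (l : List (String × Int)) : Option (String × Int) :=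
  (PySem.List.max? (l.map Prod.snd) (fun v => v)).bind (fun m => l.find? (fun p => p.2 == m))

theorem sdesc_eq_foldl (l : List (String × Int)) :
    sdesc l = l.foldl (fun acc x => PySem.List.insertBy bef x acc) [] := by
  rw [sdesc, PySem.List.sorted_eq_foldl_insertBy]
  have : (fun a b : String × Int => decide ((fun p : String × Int => -p.2) a < (fun p : String × Int => -p.2) b)) = bef := by
    funext a b
    simp only [bef, decide_eq_decide]
    omega
  rw [this]

theorem sdesc_append_singleton (l : List (String × Int)) (x : String × Int) :
    sdesc (l ++ [x]) = PySem.List.insertBy bef x (sdesc l) := by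
  rw [sdesc_eq_foldl, sdesc_eq_foldl, List.foldl_append]
  simp

theorem insertBy_all_before (x : String × Int) (zs : List (String × Int))
    (h : ∀ z ∈ zs, bef x z = true) : PySem.List.insertBy bef x zs = x :: zs := by
  cases zs with
  | nil => rfl
  | cons z zt => simp [PySem.List.insertBy, h z (by simp)]

theorem insertBy_cons_of_not_before (x y : String × Int) (ys : List (String × Int))
    (h : bef x y = false) :
    PySem.List.insertBy bef x (y :: ys) = y :: PySem.List.insertBy bef x ys := by
  simp [PySem.List.insertBy, h]

theorem sdesc_pairwise (l : List (String × Int)) :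
    (sdesc l).Pairwise (fun a b => b.2 ≤ a.2) := by
  have := PySem.List.sorted_pairwise l (fun p => -p.2)
  exact this.imp (by intro a b hab; omega)

theorem sdesc_perm (l : List (String × Int)) : (sdesc l).Perm l :=
  PySem.List.sorted_perm l (fun p => -p.2) false

theorem filter_insertBy (q : String × Int → Bool) (x : String × Int) (acc : List (String × Int))
    (hs : acc.Pairwise (fun a b => b.2 ≤ a.2)) :
    (PySem.List.insertBy bef x acc).filter q =
      if q x then PySem.List.insertBy bef x (acc.filter q) else acc.filter q := by
  induction acc with
  | nil => by_cases hq : q x <;> simp [PySem.List.insertBy, hq]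
  | cons y ys ih =>
    have hys : ys.Pairwise (fun a b => b.2 ≤ a.2) := hs.tail
    by_cases hb : bef x y
    · have hall : ∀ z ∈ ys.filter q, bef x z = true := by
        intro z hz
        have h1 : z.2 ≤ y.2 := (List.pairwise_cons.mp hs).1 z (List.mem_of_mem_filter hz)
        have h2 : y.2 < x.2 := by simpa [bef] using hb
        simp only [bef, decide_eq_true_eq]; omega
      by_cases hq : q x <;> by_cases hqy : q y <;>
        simp [PySem.List.insertBy, hb, hq, hqy, insertBy_all_before _ _ hall]
    · have hb' : bef x y = false := by simpa using hb
      rw [insertBy_cons_of_not_before x y ys hb']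
      by_cases hq : q x <;> by_cases hqy : q y <;>
        simp [List.filter_cons, hq, hqy, ih hys, insertBy_cons_of_not_before _ _ _ hb']

theorem sdesc_filter (q : String × Int → Bool) (l : List (String × Int)) :
    sdesc (l.filter q) = (sdesc l).filter q := by
  induction l using List.reverseRecOn with
  | nil => simp [sdesc, PySem.List.sorted]
  | append_singleton l x ih =>
    rw [sdesc_append_singleton, filter_insertBy q x _ (sdesc_pairwise l), List.filter_append]
    by_cases hq : q x
    · simp [hq, sdesc_append_singleton, ih]
    · simp [hq, ih]


theorem max?_append_some {ys : List Int} {m : Int} (v : Int)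
    (h : PySem.List.max? ys (fun a => a) = some m) :
    PySem.List.max? (ys ++ [v]) (fun a => a) = some (if m < v then v else m) := by
  unfold PySem.List.max? at h ⊢
  rw [List.foldl_append, h]
  simp only [List.foldl_cons, List.foldl_nil]
  by_cases hc : m < v <;> simp [hc]

theorem sel (l : List (String × Int)) (hne : l ≠ []) (hnd : (l.map Prod.fst).Nodup) :
    ∃ f, f ∈ l ∧ A_select l = some f ∧
      sdesc l = f :: sdesc (l.filter (fun q => !(q.1 == f.1))) := by
  induction l using List.reverseRecOn with
  | nil => cases hne rfl
  | append_singleton l' x ih =>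
    by_cases hl' : l' = []
    · subst hl'
      refine ⟨x, by simp, ?_, ?_⟩
      · simp [A_select, PySem.List.max?, List.find?]
      · simp [sdesc_eq_foldl, PySem.List.insertBy]
    · have hmapapp : ((l' ++ [x]).map Prod.fst) = l'.map Prod.fst ++ [x.1] := by simp
      rw [hmapapp] at hnd
      have hnd' : (l'.map Prod.fst).Nodup := (List.nodup_append.mp hnd).1
      have hx : x.1 ∉ l'.map Prod.fst := by
        have hdisj := (List.nodup_append.mp hnd).2.2
        intro hmem
        exact hdisj x.1 hmem x.1 (List.mem_singleton_self _) rfl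
      obtain ⟨f', hf'mem, hf'sel, hf'sd⟩ := ih hl' hnd'
      unfold A_select at hf'sel
      cases hm' : PySem.List.max? (l'.map Prod.snd) (fun v => v) with
      | none => rw [hm'] at hf'sel; simp at hf'sel
      | some m' =>
        rw [hm'] at hf'sel
        simp only [Option.bind_some] at hf'sel
        have hf'2 : f'.2 = m' := by simpa using List.find?_some hf'sel
        have hmax : ∀ p ∈ l', p.2 ≤ m' := by
          intro p hp
          exact PySem.List.max?_isMax hm' p.2 (List.mem_map_of_mem hp)
        by_cases hcase : m' < x.2
        · refine ⟨x, by simp, ?_, ?_⟩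
          · unfold A_select
            simp only [List.map_append, List.map_cons, List.map_nil]
            rw [max?_append_some x.2 hm']
            simp only [if_pos hcase, Option.bind_some]
            rw [List.find?_append]
            have hnone : l'.find? (fun p => p.2 == x.2) = none := by
              rw [List.find?_eq_none]
              intro p hp
              have := hmax p hp
              simp only [beq_iff_eq]
              omega
            rw [hnone]
            simp
          · rw [sdesc_append_singleton]
            have hfront : PySem.List.insertBy bef x (sdesc l') = x :: sdesc l' := by
              apply insertBy_all_before
              intro z hz
              have hz' : z ∈ l' := (sdesc_perm l').mem_iff.mp hz
              have := hmax z hz'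
              simp only [bef, decide_eq_true_eq]
              omega
            rw [hfront]
            have hfl : (l' ++ [x]).filter (fun q => !(q.1 == x.1)) = l' := by
              rw [List.filter_append]
              simp only [List.filter_cons, List.filter_nil]
              have : l'.filter (fun q => !(q.1 == x.1)) = l' := by
                rw [List.filter_eq_self]
                intro p hp
                simp only [Bool.not_eq_eq_eq_not, Bool.not_true, beq_eq_false_iff_ne, ne_eq]
                intro hpx
                exact hx (hpx ▸ List.mem_map_of_mem hp)
              simp [this]
            rw [hfl]
        · have hxle : x.2 ≤ m' := by omega
          refine ⟨f', List.mem_append_left _ hf'mem, ?_, ?_⟩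
          · unfold A_select
            simp only [List.map_append, List.map_cons, List.map_nil]
            rw [max?_append_some x.2 hm']
            simp only [if_neg hcase, Option.bind_some]
            rw [List.find?_append, hf'sel]
            rfl
          · have hxne : x.1 ≠ f'.1 := by
              intro heq
              exact hx (heq ▸ List.mem_map_of_mem hf'mem)
            rw [sdesc_append_singleton, hf'sd]
            rw [insertBy_cons_of_not_before _ _ _ (by simp only [bef, decide_eq_false_iff_not, not_lt]; omega)]
            rw [← sdesc_append_singleton]
            congr 1
            rw [List.filter_append]
            simp [hxne]


theorem pop?_mk {cr : List (String × Int)} (hnd : (cr.map Prod.fst).Nodup) {f : String × Int}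
    (hf : f ∈ cr) :
    (PySem.Dict.mk cr).pop? f.1 = some (f.2, PySem.Dict.mk (cr.filter (fun q => !(q.1 == f.1)))) := by
  have hget : (PySem.Dict.mk cr).get? f.1 = some f.2 :=
    PySem.Dict.get?_of_mem_items _ (by simpa using hf) (by simpa [PySem.Dict.keys] using hnd)
  unfold PySem.Dict.pop?
  rw [hget]
  rfl

theorem largestcowA_mk {l : List (String × Int)} (hnd : (l.map Prod.fst).Nodup)
    {f : String × Int} (hsel : A_select l = some f) (hf : f ∈ l) :
    largestcowA (PySem.Dict.mk l) =
      some (f.2, f.1, PySem.Dict.mk (l.filter (fun q => !(q.1 == f.1)))) := by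
  unfold A_select at hsel
  cases hm : PySem.List.max? (l.map Prod.snd) (fun v => v) with
  | none => rw [hm] at hsel; simp at hsel
  | some m =>
    rw [hm] at hsel
    simp only [Option.bind_some] at hsel
    unfold largestcowA
    have hvals : (PySem.Dict.mk l).values = l.map Prod.snd := rfl
    rw [show (PySem.List.max? (PySem.Dict.mk l).values fun v => v) = some m from hm]
    dsimp only
    rw [show (PySem.Dict.mk l).items.find? (fun p => p.2 == m) = some f from hsel]
    dsimp only
    have hf2 : f = (f.1, f.2) := rfl
    rw [pop?_mk hnd hf]

theorem largestcowA_mk_nil : largestcowA (PySem.Dict.mk []) = none := rfl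

theorem sdesc_nil : sdesc [] = [] := rfl


theorem inner_eq (limit : Int) :
    ∀ (N : Nat) (lf cr : List (String × Int)) (p : (String × Int) → Bool) (w : Int) (tr : List String),
      lf.length ≤ N → (cr.map Prod.fst).Nodup → lf = cr.filter p →
      ∃ (g : (String × Int) → Bool) (w' : Int) (tr' : List String),
        innerA limit N (PySem.Dict.mk lf) (PySem.Dict.mk cr) w tr = (w', tr', PySem.Dict.mk (cr.filter g)) ∧
        packB limit w tr (sdesc lf) = (tr', (sdesc lf).filter g) ∧
        (∀ q ∈ cr, q ∉ lf → g q = true) := by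
  intro N
  induction N with
  | zero =>
    intro lf cr p w tr hlen hnd hfil
    have hlf : lf = [] := List.eq_nil_of_length_eq_zero (Nat.le_zero.mp hlen)
    subst hlf
    refine ⟨fun _ => true, w, tr, ?_, ?_, ?_⟩
    · simp [innerA]
    · simp [sdesc_nil, packB]
    · intro q _ _; rfl
  | succ N ihN =>
    intro lf cr p w tr hlen hnd hfil
    by_cases hlf : lf = []
    · subst hlf
      refine ⟨fun _ => true, w, tr, ?_, ?_, ?_⟩
      · simp [innerA, largestcowA_mk_nil]
      · simp [sdesc_nil, packB]
      · intro q _ _; rfl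
    · have hndlf : (lf.map Prod.fst).Nodup := by
        subst hfil
        exact (List.filter_sublist.map Prod.fst).nodup hnd
      obtain ⟨f, hfmem, hfsel, hfsd⟩ := sel lf hlf hndlf
      have hfcr : f ∈ cr := List.mem_of_mem_filter (hfil ▸ hfmem)
      have hlarge : largestcowA (PySem.Dict.mk lf) =
          some (f.2, f.1, PySem.Dict.mk (lf.filter (fun q => !(q.1 == f.1)))) :=
        largestcowA_mk hndlf hfsel hfmem
      have hlen' : (lf.filter (fun q => !(q.1 == f.1))).length ≤ N := by
        have : (lf.filter (fun q => !(q.1 == f.1))).length < lf.length :=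
          List.length_filter_lt_length_iff_exists.mpr ⟨f, hfmem, by simp⟩
        omega
      have hkey : ∀ q ∈ cr, q.1 = f.1 → q = f :=
        fun q hq hqf => List.inj_on_of_nodup_map hnd hq hfcr hqf
      obtain ⟨fn, fw⟩ := f
      simp only at hlarge hfsd hlen' hkey hfcr hfmem
      have hnotlf' : ∀ q, q ∈ lf.filter (fun q => !(q.1 == fn)) → q ∈ lf :=
        fun q hq => List.mem_of_mem_filter hq
      have hfnotlf' : ((fn, fw) : String × Int) ∉ lf.filter (fun q => !(q.1 == fn)) := by
        intro hmem
        have := (List.mem_filter.mp hmem).2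
        simp at this
      simp only [innerA]
      rw [hlarge]
      dsimp only
      rw [hfsd]
      by_cases hle : w + fw ≤ limit
      · rw [pop?_mk hnd hfcr]
        dsimp only
        by_cases hbrk : w + fw = limit
        · -- added and the trip is exactly full: both stop
          refine ⟨fun q => !(q.1 == fn), w + fw, tr ++ [fn], ?_, ?_, ?_⟩
          · simp [hle, hbrk]
          · have hid : (sdesc (lf.filter (fun q => !(q.1 == fn)))).filter (fun q => !(q.1 == fn)) =
                sdesc (lf.filter (fun q => !(q.1 == fn))) := by
              rw [List.filter_eq_self]
              intro a ha
              have ha' : a ∈ lf.filter (fun q => !(q.1 == fn)) := (sdesc_perm _).mem_iff.mp ha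
              exact (List.mem_filter.mp ha').2
            simp [packB, hle, hbrk, hid]
          · intro q hq hqlf
            simp only [Bool.not_eq_eq_eq_not, Bool.not_true, beq_eq_false_iff_ne, ne_eq]
            intro hqf
            exact hqlf ((hkey q hq hqf).symm ▸ hfmem)
        · -- added, trip not full: recurse on both sides
          have hnd2 : ((cr.filter (fun q => !(q.1 == fn))).map Prod.fst).Nodup :=
            (List.filter_sublist.map Prod.fst).nodup hnd
          have hfil2 : lf.filter (fun q => !(q.1 == fn)) =
              (cr.filter (fun q => !(q.1 == fn))).filter p := by
            rw [hfil, List.filter_comm]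
          obtain ⟨g', w', tr', hA, hB, hg'⟩ :=
            ihN (lf.filter (fun q => !(q.1 == fn))) (cr.filter (fun q => !(q.1 == fn)))
              p (w + fw) (tr ++ [fn]) hlen' hnd2 hfil2
          refine ⟨fun q => !(q.1 == fn) && g' q, w', tr', ?_, ?_, ?_⟩
          · have hff : List.filter g' (List.filter (fun q => !(q.1 == fn)) cr) =
                List.filter (fun q => (!(q.1 == fn)) && g' q) cr := by
              rw [List.filter_filter]
              exact List.filter_congr (fun a _ => Bool.and_comm _ _)
            rw [if_pos hle, if_neg hbrk, hA, hff]
          · simp only [packB, if_pos hle, if_neg hbrk]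
            rw [hB]
            have hcond : (!(fn == fn) && g' (fn, fw)) = false := by simp
            simp only [List.filter_cons, hcond, Bool.false_eq_true, if_false]
            congr 1
            refine (List.filter_congr ?_).symm
            intro q hq
            have hq1 : (!(q.1 == fn)) = true := (List.mem_filter.mp ((sdesc_perm _).mem_iff.mp hq)).2
            simp [hq1]
          · intro q hq hqlf
            have hq1 : (!(q.1 == fn)) = true := by
              simp only [Bool.not_eq_eq_eq_not, Bool.not_true, beq_eq_false_iff_ne, ne_eq]
              intro hqf
              exact hqlf ((hkey q hq hqf).symm ▸ hfmem)
            have hq2 : g' q = true := by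
              apply hg'
              · exact List.mem_filter.mpr ⟨hq, hq1⟩
              · intro hmem
                exact hqlf (hnotlf' q hmem)
            simp [hq1, hq2]
      · by_cases hbrk : w = limit
        · -- not added and already full: both stop, everything is left over
          refine ⟨fun _ => true, w, tr, ?_, ?_, ?_⟩
          · rw [if_neg hle, if_pos hbrk]
            simp
          · simp only [packB, if_neg hle, if_pos hbrk]
            rw [← hfsd]
            simp
          · intro q _ _; rfl
        · -- not added: both skip f and go on
          have hfil2 : lf.filter (fun q => !(q.1 == fn)) =
              cr.filter (fun a => (!(a.1 == fn)) && p a) := by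
            rw [hfil, List.filter_filter]
          obtain ⟨g', w', tr', hA, hB, hg'⟩ :=
            ihN (lf.filter (fun q => !(q.1 == fn))) cr (fun a => (!(a.1 == fn)) && p a)
              w tr hlen' hnd hfil2
          have hgf : g' (fn, fw) = true := hg' (fn, fw) hfcr hfnotlf'
          refine ⟨g', w', tr', ?_, ?_, ?_⟩
          · rw [if_neg hle, if_neg hbrk, hA]
          · simp only [packB, if_neg hle, if_neg hbrk]
            rw [hB]
            simp only [List.filter_cons, hgf]
            simp
          · intro q hq hqlf
            apply hg' q hq
            intro hmem
            exact hqlf (hnotlf' q hmem)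


theorem outer_eq (limit : Int) :
    ∀ (N : Nat) (cr : List (String × Int)), cr.length ≤ N → (cr.map Prod.fst).Nodup →
      outerA limit N (PySem.Dict.mk cr) = outerB limit N (sdesc cr) := by
  intro N
  induction N with
  | zero =>
    intro cr hlen _
    simp [outerA, outerB]
  | succ N ihN =>
    intro cr hlen hnd
    by_cases hcr : cr = []
    · subst hcr
      simp [outerA, outerB, largestcowA_mk_nil, sdesc_nil]
    · obtain ⟨f, hfmem, hfsel, hfsd⟩ := sel cr hcr hnd
      have hlarge : largestcowA (PySem.Dict.mk cr) =
          some (f.2, f.1, PySem.Dict.mk (cr.filter (fun q => !(q.1 == f.1)))) :=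
        largestcowA_mk hnd hfsel hfmem
      obtain ⟨fn, fw⟩ := f
      simp only at hlarge hfsd
      have hnd2 : ((cr.filter (fun q => !(q.1 == fn))).map Prod.fst).Nodup :=
        (List.filter_sublist.map Prod.fst).nodup hnd
      obtain ⟨g, w', tr', hA, hB, hg⟩ :=
        inner_eq limit (cr.filter (fun q => !(q.1 == fn))).length
          (cr.filter (fun q => !(q.1 == fn))) (cr.filter (fun q => !(q.1 == fn)))
          (fun _ => true) fw [fn] le_rfl hnd2 (List.filter_true _).symm
      show (match largestcowA (PySem.Dict.mk cr) with
        | none => []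
        | some (tripwgt, firstcow, crew') =>
          match innerA limit crew'.items.length crew' crew' tripwgt [firstcow] with
          | (_, trip, crew'') => trip :: outerA limit N crew'') = _
      rw [hlarge]
      dsimp only
      rw [hA]
      dsimp only
      rw [hfsd]
      show _ = (match packB limit fw [fn] (sdesc (cr.filter (fun q => !(q.1 == fn)))) with
        | (trip, leftover) => trip :: outerB limit N leftover)
      rw [hB]
      dsimp only
      congr 1
      rw [← sdesc_filter]
      have hlen2 : (List.filter g (cr.filter (fun q => !(q.1 == fn)))).length ≤ N := by
        have h1 : (cr.filter (fun q => !(q.1 == fn))).length < cr.length :=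
          List.length_filter_lt_length_iff_exists.mpr ⟨(fn, fw), hfmem, by simp⟩
        have h2 := List.length_filter_le g (cr.filter (fun q => !(q.1 == fn)))
        omega
      exact ihN _ hlen2 ((List.filter_sublist.map Prod.fst).nodup hnd2)

-- ===== VERDICT (by name: the statement is the Claim_ definition above) =====
theorem renata_kb_spec : Claim_equal_renata_kb := by
  unfold Claim_equal_renata_kb
  intro cows limit _
  unfold Spec_renata_kb renata_kb renata_kb_alt
  have hnd : ((PySem.Dict.ofList cows).items.map Prod.fst).Nodup := by
    have h := PySem.Dict.nodup_keys_ofList (ps := cows)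
    simpa [PySem.Dict.keys] using h
  have h := outer_eq limit ((PySem.Dict.ofList cows).items.length)
    (PySem.Dict.ofList cows).items le_rfl hnd
  have hlen : (PySem.List.sorted (PySem.Dict.ofList cows).items (fun p => -p.2) false).length =
      (PySem.Dict.ofList cows).items.length :=
    (PySem.List.sorted_perm _ _ _).length_eq
  rw [hlen]
  simpa [sdesc] using h
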